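-- pv_equiv track=rewrite | github.com/elecxDev/BaitBlock | backend/server.py | check_domain_reputation
-- ===== SOURCE A (Python) =====
-- def check_domain_reputation(domain):
--     # Trusted domains that should never be flagged as phishing
--     trusted_domains = [
--         "apple.com", "email.apple.com", "account.apple.com", "support.apple.com",
--         "microsoft.com", "outlook.com", "live.com", "hotmail.com",
--         "google.com", "gmail.com", "accounts.google.com",
--         "amazon.com", "amazon.co.uk", "amazon.de", "amazon.fr",
--         "paypal.com", "facebook.com", "meta.com", "instagram.com",
--         "twitter.com", "x.com", "linkedin.com", "github.com",
--         "dropbox.com", "spotify.com", "netflix.com", "adobe.com"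
--     ]
--
--     # Check if domain or any parent domain is trusted
--     domain_lower = domain.lower()
--     for trusted in trusted_domains:
--         if domain_lower == trusted or domain_lower.endswith('.' + trusted):
--             return True, "Trusted domain"
--
--     # Known bad domains
--     bad_domains = ["badsite.tk", "phishingsite.com"]
--     if domain_lower in bad_domains:
--         return False, "Domain found in phishing blacklist"
--
--     return True, ""
-- ===== SOURCE B (Python) =====
-- # Idiomatic re-implementation: precomputed frozensets + dot-boundary suffix enumeration
-- # instead of scanning the trusted list with endswith for each entry.
--
-- TRUSTED_DOMAINS = frozenset([
--     "apple.com", "email.apple.com", "account.apple.com", "support.apple.com",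
--     "microsoft.com", "outlook.com", "live.com", "hotmail.com",
--     "google.com", "gmail.com", "accounts.google.com",
--     "amazon.com", "amazon.co.uk", "amazon.de", "amazon.fr",
--     "paypal.com", "facebook.com", "meta.com", "instagram.com",
--     "twitter.com", "x.com", "linkedin.com", "github.com",
--     "dropbox.com", "spotify.com", "netflix.com", "adobe.com",
-- ])
--
-- BAD_DOMAINS = frozenset(["badsite.tk", "phishingsite.com"])
--
--
-- def _dot_suffixes(s):
--     # suffixes of s that start right after a '.'
--     return [s[i + 1:] for i, ch in enumerate(s) if ch == '.']
--
--
-- def check_domain_reputation(domain):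
--     d = domain.lower()
--     if d in TRUSTED_DOMAINS or any(suf in TRUSTED_DOMAINS for suf in _dot_suffixes(d)):
--         return True, "Trusted domain"
--     if d in BAD_DOMAINS:
--         return False, "Domain found in phishing blacklist"
--     return True, ""
-- ===== Notes on version B (the rewrite author's own statement) =====
-- stated objective: idiomatic
-- what changed: B replaces A's scan of the trusted list with an endswith test per entry by precomputed frozensets and a single enumeration of the domain's dot-boundary suffixes, each looked up in the set.
import Mathlib
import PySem

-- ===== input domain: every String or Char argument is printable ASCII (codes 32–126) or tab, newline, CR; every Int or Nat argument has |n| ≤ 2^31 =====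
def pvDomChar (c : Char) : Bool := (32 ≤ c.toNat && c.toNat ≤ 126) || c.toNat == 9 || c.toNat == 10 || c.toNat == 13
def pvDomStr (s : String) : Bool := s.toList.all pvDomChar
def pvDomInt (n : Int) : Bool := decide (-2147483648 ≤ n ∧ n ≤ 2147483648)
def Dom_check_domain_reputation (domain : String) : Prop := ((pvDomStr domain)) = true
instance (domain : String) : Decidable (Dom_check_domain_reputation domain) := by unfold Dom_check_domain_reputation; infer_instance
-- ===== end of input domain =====

-- B: precomputed sets + dot-boundary suffix enumeration instead of an endswith scan of the trusted list (idiomatic).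


-- ===== PORT A =====
def pvTrustedA : List (List Char) :=
  ["apple.com".toList, "email.apple.com".toList, "account.apple.com".toList, "support.apple.com".toList,
   "microsoft.com".toList, "outlook.com".toList, "live.com".toList, "hotmail.com".toList,
   "google.com".toList, "gmail.com".toList, "accounts.google.com".toList,
   "amazon.com".toList, "amazon.co.uk".toList, "amazon.de".toList, "amazon.fr".toList,
   "paypal.com".toList, "facebook.com".toList, "meta.com".toList, "instagram.com".toList,
   "twitter.com".toList, "x.com".toList, "linkedin.com".toList, "github.com".toList,
   "dropbox.com".toList, "spotify.com".toList, "netflix.com".toList, "adobe.com".toList]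

def pvBadA : List (List Char) := ["badsite.tk".toList, "phishingsite.com".toList]

-- the for-loop with early return over trusted_domains
def pvALoop (dl : List Char) : List (List Char) → Option (Bool × String)
  | [] => none
  | t :: rest =>
    if dl == t || PySem.Chars.endswith dl ('.' :: t) then some (true, "Trusted domain")
    else pvALoop dl rest

def pvABody (dl : List Char) : Bool × String :=
  match pvALoop dl pvTrustedA with
  | some r => r
  | none =>
    if dl ∈ pvBadA then (false, "Domain found in phishing blacklist")
    else (true, "")

def check_domain_reputation (domain : String) : Bool × String :=
  pvABody (PySem.Chars.lower domain.toList)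

-- ===== PORT B =====
def pvTrustedSet : PySem.Set (List Char) := PySem.Set.ofList pvTrustedA
def pvBadSet : PySem.Set (List Char) := PySem.Set.ofList pvBadA

-- suffixes of s starting right after a '.' (B's _dot_suffixes)
def pvDotSuffixes : List Char → List (List Char)
  | [] => []
  | c :: rest => (if c = '.' then [rest] else []) ++ pvDotSuffixes rest

def pvBBody (d : List Char) : Bool × String :=
  if d ∈ pvTrustedSet || (pvDotSuffixes d).any (fun suf => decide (suf ∈ pvTrustedSet)) then
    (true, "Trusted domain")
  else if d ∈ pvBadSet then (false, "Domain found in phishing blacklist")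
  else (true, "")

def check_domain_reputation_alt (domain : String) : Bool × String :=
  pvBBody (PySem.Chars.lower domain.toList)

-- ===== PRECONDITION & SPEC =====
def Spec_check_domain_reputation (domain : String) (out : Bool × String) : Prop := out = check_domain_reputation_alt domain
instance (domain : String) (out : Bool × String) : Decidable (Spec_check_domain_reputation domain out) := by unfold Spec_check_domain_reputation; infer_instance

-- ===== CLAIM (what is proved, stated in full; the proofs are below) =====
def Claim_equal_check_domain_reputation : Prop := ∀ (domain : String), Dom_check_domain_reputation domain → Spec_check_domain_reputation domain (check_domain_reputation domain)

-- ===== LEMMAS AND PROOFS =====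

-- A's loop returns the trusted verdict iff some entry matches, else falls through
theorem pvALoop_eq (dl : List Char) (L : List (List Char)) :
    pvALoop dl L =
      (if L.any (fun t => dl == t || PySem.Chars.endswith dl ('.' :: t)) then
        some (true, "Trusted domain") else none) := by
  induction L with
  | nil => simp [pvALoop]
  | cons t rest ih =>
    by_cases h : (dl == t || PySem.Chars.endswith dl ('.' :: t)) = true
    · simp [pvALoop, h]
    · simp [pvALoop, h, ih]

-- a dot-boundary suffix is exactly a '.'-prefixed suffix of the string
theorem mem_pvDotSuffixes (t : List Char) (d : List Char) :
    t ∈ pvDotSuffixes d ↔ ('.' :: t) <:+ d := by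
  induction d with
  | nil => simp [pvDotSuffixes]
  | cons c rest ih =>
    by_cases hc : c = '.'
    · subst hc
      simp [pvDotSuffixes, ih, List.suffix_cons_iff]
    · simp only [pvDotSuffixes, if_neg hc, List.nil_append, ih, List.suffix_cons_iff,
        List.cons_eq_cons]
      constructor
      · exact Or.inr
      · rintro (⟨h1, _⟩ | h)
        · exact absurd h1.symm hc
        · exact h

-- the two trusted tests agree
theorem trusted_any_eq (d : List Char) :
    pvTrustedA.any (fun t => d == t || PySem.Chars.endswith d ('.' :: t)) =
      (d ∈ pvTrustedSet || (pvDotSuffixes d).any (fun suf => decide (suf ∈ pvTrustedSet))) := by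
  rw [Bool.eq_iff_iff]
  simp only [pvTrustedSet, List.any_eq_true, Bool.or_eq_true, beq_iff_eq, decide_eq_true_eq,
    PySem.Set.mem_ofList, PySem.Chars.endswith_iff]
  constructor
  · rintro ⟨t, ht, h | h⟩
    · exact Or.inl (h ▸ ht)
    · exact Or.inr ⟨t, (mem_pvDotSuffixes t d).mpr h, ht⟩
  · rintro (h | ⟨suf, hs, hmem⟩)
    · exact ⟨d, h, Or.inl rfl⟩
    · exact ⟨suf, hmem, Or.inr ((mem_pvDotSuffixes suf d).mp hs)⟩

-- ===== VERDICT (by name: the statement is the Claim_ definition above) =====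
theorem check_domain_reputation_spec : Claim_equal_check_domain_reputation := by
  intro domain _
  unfold Spec_check_domain_reputation check_domain_reputation check_domain_reputation_alt
  unfold pvABody pvBBody
  rw [pvALoop_eq, trusted_any_eq]
  set d := PySem.Chars.lower domain.toList with hd
  by_cases h : (d ∈ pvTrustedSet || (pvDotSuffixes d).any (fun suf => decide (suf ∈ pvTrustedSet))) = true
  · simp [h]
  · by_cases hb : d ∈ pvBadA
    · simp [h, hb, pvBadSet, PySem.Set.mem_ofList]
    · simp [h, hb, pvBadSet, PySem.Set.mem_ofList]
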